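-- pv_equiv track=rewrite | github.com/SZNASKME/AutomateDEV | Stonebranch/API/CheckTaskMonitor/cleanJsonToExcel.py | prepareTaskMonitorRowsSummary
-- ===== SOURCE A (Python) =====
-- def prepareTaskMonitorRowsSummary(json_data, unique_task_monitor_list):
--     task_monitor_summary_rows = []
--     for task_monitor in unique_task_monitor_list:
--         task_list = []
--         workflow_list = []
--         trigger_list = []
--         for trigger_name, trigger_data in json_data.items():
--             for workflow_name, workflow_data in trigger_data.items():
--                 for task_name, task_monitor_list in workflow_data.items():
--                     if task_monitor in task_monitor_list:
--                         if task_name not in task_list: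
--                             task_list.append(task_name)
--                         if workflow_name not in workflow_list:
--                             workflow_list.append(workflow_name)
--                         if trigger_name not in trigger_list:
--                             trigger_list.append(trigger_name)
--         task_monitor_summary_row = {
--             'Task Monitor': task_monitor,
--             'Main workflow': ', '.join(task_list),
--             'Sub workflow': ', '.join(workflow_list),
--             'Triggers': ', '.join(trigger_list)
--         }
--         task_monitor_summary_rows.append(task_monitor_summary_row)
--     return task_monitor_summary_rows
-- ===== SOURCE B (Python) =====
-- def prepareTaskMonitorRowsSummary(json_data, unique_task_monitor_list):
--     # One pass over json_data: build, per task monitor, its ordered (tasks, workflows, triggers).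
--     acc = {}
--     for trigger_name, trigger_data in json_data.items():
--         for workflow_name, workflow_data in trigger_data.items():
--             for task_name, task_monitor_list in workflow_data.items():
--                 for task_monitor in task_monitor_list:
--                     tasks, workflows, triggers = acc.setdefault(task_monitor, ([], [], []))
--                     if task_name not in tasks:
--                         tasks.append(task_name)
--                     if workflow_name not in workflows:
--                         workflows.append(workflow_name)
--                     if trigger_name not in triggers:
--                         triggers.append(trigger_name)
--     rows = []
--     for task_monitor in unique_task_monitor_list:
--         tasks, workflows, triggers = acc.get(task_monitor, ([], [], []))
--         rows.append({
--             'Task Monitor': task_monitor,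
--             'Main workflow': ', '.join(tasks),
--             'Sub workflow': ', '.join(workflows),
--             'Triggers': ', '.join(triggers)
--         })
--     return rows
-- ===== Notes on version B (the rewrite author's own statement) =====
-- stated objective: faster
-- what changed: Instead of rescanning the whole nested json_data once per monitor, B makes a single pass over json_data building a dict from monitor to its ordered (tasks, workflows, triggers) lists, then emits one row per requested monitor by lookup.
import Mathlib
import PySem

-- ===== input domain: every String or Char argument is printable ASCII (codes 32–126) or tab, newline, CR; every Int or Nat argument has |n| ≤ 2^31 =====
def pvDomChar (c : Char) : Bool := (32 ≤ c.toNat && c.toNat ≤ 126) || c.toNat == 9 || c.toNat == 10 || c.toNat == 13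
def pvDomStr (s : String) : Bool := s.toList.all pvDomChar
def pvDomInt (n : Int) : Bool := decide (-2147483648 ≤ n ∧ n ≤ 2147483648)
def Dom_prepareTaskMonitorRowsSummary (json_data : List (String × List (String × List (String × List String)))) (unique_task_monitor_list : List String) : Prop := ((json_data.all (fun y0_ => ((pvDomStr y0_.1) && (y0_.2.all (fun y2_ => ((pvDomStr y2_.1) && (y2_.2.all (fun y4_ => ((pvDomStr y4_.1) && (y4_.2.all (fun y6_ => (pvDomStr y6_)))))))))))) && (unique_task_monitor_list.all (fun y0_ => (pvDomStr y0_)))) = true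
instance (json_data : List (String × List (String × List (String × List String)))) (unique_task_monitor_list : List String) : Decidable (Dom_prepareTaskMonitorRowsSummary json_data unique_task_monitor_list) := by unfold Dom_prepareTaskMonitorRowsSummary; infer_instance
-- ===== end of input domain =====

-- B replaces A's rescan of the whole nested json_data for every monitor by a single pass
-- building a dict monitor → (tasks, workflows, triggers); same rows, asymptotically faster.

-- ===== PORT A =====
-- conditional dedup-append, shared by both ports (both Pythons do the same three
-- 'if x not in lst: lst.append(x)' updates on the three independent lists)
def pvApp1 (x : String) (l : List String) : List String :=
  if x ∈ l then l else l ++ [x]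

def pvUpd (tname wname trname : String) (t : List String × List String × List String) :
    List String × List String × List String :=
  (pvApp1 tname t.1, pvApp1 wname t.2.1, pvApp1 trname t.2.2)

def prepareTaskMonitorRowsSummary (json_data : List (String × List (String × List (String × List String)))) (unique_task_monitor_list : List String) : List (List (String × String)) :=
  unique_task_monitor_list.foldl (fun rows tm =>
    let s := json_data.foldl (fun s tp =>
      tp.2.foldl (fun s wp =>
        wp.2.foldl (fun s kp =>
          if tm ∈ kp.2 then pvUpd kp.1 wp.1 tp.1 s else s) s) s) ([], [], [])
    rows ++ [[("Task Monitor", tm), ("Main workflow", PySem.Str.join ", " s.1),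
              ("Sub workflow", PySem.Str.join ", " s.2.1), ("Triggers", PySem.Str.join ", " s.2.2)]])
    []

-- ===== PORT B =====
-- the single building pass (Python B's acc dict; setdefault-then-mutate = insert of updated triple)
def pvBuild (json_data : List (String × List (String × List (String × List String)))) :
    PySem.Dict String (List String × List String × List String) :=
  json_data.foldl (fun acc tp =>
    tp.2.foldl (fun acc wp =>
      wp.2.foldl (fun acc kp =>
        kp.2.foldl (fun acc tm =>
          acc.insert tm (pvUpd kp.1 wp.1 tp.1 (acc.getD tm ([], [], [])))) acc) acc) acc)
    PySem.Dict.empty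

def prepareTaskMonitorRowsSummary_alt (json_data : List (String × List (String × List (String × List String)))) (unique_task_monitor_list : List String) : List (List (String × String)) :=
  let acc := pvBuild json_data
  unique_task_monitor_list.map (fun tm =>
    let s := acc.getD tm ([], [], [])
    [("Task Monitor", tm), ("Main workflow", PySem.Str.join ", " s.1),
     ("Sub workflow", PySem.Str.join ", " s.2.1), ("Triggers", PySem.Str.join ", " s.2.2)])

-- ===== PRECONDITION & SPEC =====
def Spec_prepareTaskMonitorRowsSummary (json_data : List (String × List (String × List (String × List String)))) (unique_task_monitor_list : List String) (out : List (List (String × String))) : Prop := out = prepareTaskMonitorRowsSummary_alt json_data unique_task_monitor_list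
instance (json_data : List (String × List (String × List (String × List String)))) (unique_task_monitor_list : List String) (out : List (List (String × String))) : Decidable (Spec_prepareTaskMonitorRowsSummary json_data unique_task_monitor_list out) := by unfold Spec_prepareTaskMonitorRowsSummary; infer_instance

-- ===== CLAIM (what is proved, stated in full; the proofs are below) =====
def Claim_equal_prepareTaskMonitorRowsSummary : Prop := ∀ (json_data : List (String × List (String × List (String × List String)))) (unique_task_monitor_list : List String), Dom_prepareTaskMonitorRowsSummary json_data unique_task_monitor_list → Spec_prepareTaskMonitorRowsSummary json_data unique_task_monitor_list (prepareTaskMonitorRowsSummary json_data unique_task_monitor_list)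

-- ===== LEMMAS AND PROOFS =====

theorem pvUpd_idem (a b c : String) (t : List String × List String × List String) :
    pvUpd a b c (pvUpd a b c t) = pvUpd a b c t := by
  simp only [pvUpd, pvApp1]
  split_ifs with h1 h2 h3 <;> simp_all

-- inner monitor loop: the dict entry of tm after folding over lst
theorem pv_monitor_fold (a b c : String) (lst : List String)
    (acc : PySem.Dict String (List String × List String × List String)) (tm : String) :
    (lst.foldl (fun acc m => acc.insert m (pvUpd a b c (acc.getD m ([], [], [])))) acc).getD tm ([], [], [])
      = if tm ∈ lst then pvUpd a b c (acc.getD tm ([], [], [])) else acc.getD tm ([], [], []) := by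
  induction lst generalizing acc with
  | nil => simp
  | cons m rest ih =>
    simp only [List.foldl_cons, ih, PySem.Dict.getD_insert, List.mem_cons]
    by_cases hm : tm = m
    · subst hm
      by_cases hr : tm ∈ rest <;> simp [hr, pvUpd_idem]
    · by_cases hr : tm ∈ rest <;> simp [hr, hm]

-- task-level loop
theorem pv_task_fold (b : String) (c : String) (items : List (String × List String))
    (acc : PySem.Dict String (List String × List String × List String)) (tm : String) :
    (items.foldl (fun acc kp =>
        kp.2.foldl (fun acc m => acc.insert m (pvUpd kp.1 b c (acc.getD m ([], [], [])))) acc) acc).getD tm ([], [], [])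
      = items.foldl (fun s kp => if tm ∈ kp.2 then pvUpd kp.1 b c s else s) (acc.getD tm ([], [], [])) := by
  induction items generalizing acc with
  | nil => rfl
  | cons kp rest ih =>
    simp only [List.foldl_cons, ih, pv_monitor_fold]

-- workflow-level loop
theorem pv_workflow_fold (c : String) (items : List (String × List (String × List String)))
    (acc : PySem.Dict String (List String × List String × List String)) (tm : String) :
    (items.foldl (fun acc wp =>
        wp.2.foldl (fun acc kp =>
          kp.2.foldl (fun acc m => acc.insert m (pvUpd kp.1 wp.1 c (acc.getD m ([], [], [])))) acc) acc) acc).getD tm ([], [], [])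
      = items.foldl (fun s wp => wp.2.foldl (fun s kp => if tm ∈ kp.2 then pvUpd kp.1 wp.1 c s else s) s) (acc.getD tm ([], [], [])) := by
  induction items generalizing acc with
  | nil => rfl
  | cons wp rest ih =>
    simp only [List.foldl_cons, ih, pv_task_fold]

-- trigger-level loop: the built dict agrees with A's per-monitor scan
theorem pv_build_getD (json_data : List (String × List (String × List (String × List String))))
    (tm : String) :
    (pvBuild json_data).getD tm ([], [], [])
      = json_data.foldl (fun s tp =>
          tp.2.foldl (fun s wp =>
            wp.2.foldl (fun s kp => if tm ∈ kp.2 then pvUpd kp.1 wp.1 tp.1 s else s) s) s) ([], [], []) := by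
  unfold pvBuild
  have h : ∀ (l : List (String × List (String × List (String × List String))))
      (acc : PySem.Dict String (List String × List String × List String)),
      (l.foldl (fun acc tp =>
          tp.2.foldl (fun acc wp =>
            wp.2.foldl (fun acc kp =>
              kp.2.foldl (fun acc m => acc.insert m (pvUpd kp.1 wp.1 tp.1 (acc.getD m ([], [], [])))) acc) acc) acc) acc).getD tm ([], [], [])
        = l.foldl (fun s tp =>
            tp.2.foldl (fun s wp =>
              wp.2.foldl (fun s kp => if tm ∈ kp.2 then pvUpd kp.1 wp.1 tp.1 s else s) s) s) (acc.getD tm ([], [], [])) := by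
    intro l
    induction l with
    | nil => intro acc; rfl
    | cons tp rest ih =>
      intro acc
      simp only [List.foldl_cons, ih, pv_workflow_fold]
  rw [h]
  simp [PySem.Dict.getD_empty]

theorem pv_foldl_append_map {α β : Type} (f : α → β) (l : List α) (acc : List β) :
    l.foldl (fun rows x => rows ++ [f x]) acc = acc ++ l.map f := by
  induction l generalizing acc with
  | nil => simp
  | cons x rest ih => simp [ih]

-- ===== VERDICT (by name: the statement is the Claim_ definition above) =====
theorem prepareTaskMonitorRowsSummary_spec : Claim_equal_prepareTaskMonitorRowsSummary := by
  intro json_data ul _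
  show _ = _
  unfold prepareTaskMonitorRowsSummary prepareTaskMonitorRowsSummary_alt
  rw [pv_foldl_append_map]
  simp only [List.nil_append]
  apply List.map_congr_left
  intro tm _
  rw [pv_build_getD]
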